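-- pv_equiv track=rewrite | github.com/noelbundick-oai/blobfile | blobfile/_ops.py | _split_path
-- ===== SOURCE A (Python) =====
-- from typing import (
--     overload,
--     Optional,
--     Tuple,
--     Callable,
--     Sequence,
--     Iterator,
--     Mapping,
--     Any,
--     Dict,
--     TextIO,
--     BinaryIO,
--     cast,
--     NamedTuple,
--     List,
--     Union,
--     TYPE_CHECKING,
-- )
--
-- def _split_path(path: str) -> List[str]:
--     # a/b/c => a/, b/, c
--     # a/b/ => a/, b/
--     # /a/b/c => /, a/, b/, c
--     parts = []
--     part = ""
--     for c in path:
--         part += c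
--         if c == "/":
--             parts.append(part)
--             part = ""
--     if part != "":
--         parts.append(part)
--     return parts
-- ===== SOURCE B (Python) =====
-- def _split_path(path: str):
--     parts = path.split("/")
--     out = [p + "/" for p in parts[:-1]]
--     if parts[-1]:
--         out.append(parts[-1])
--     return out
-- ===== Notes on version B (the rewrite author's own statement) =====
-- stated objective: idiomatic
-- what changed: B replaces A's character-by-character accumulation loop with a single str.split call on the separator, rebuilding the separator-terminated segments by re-appending the separator to every piece but the last and keeping the last piece only when non-empty.
import Mathlib
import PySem

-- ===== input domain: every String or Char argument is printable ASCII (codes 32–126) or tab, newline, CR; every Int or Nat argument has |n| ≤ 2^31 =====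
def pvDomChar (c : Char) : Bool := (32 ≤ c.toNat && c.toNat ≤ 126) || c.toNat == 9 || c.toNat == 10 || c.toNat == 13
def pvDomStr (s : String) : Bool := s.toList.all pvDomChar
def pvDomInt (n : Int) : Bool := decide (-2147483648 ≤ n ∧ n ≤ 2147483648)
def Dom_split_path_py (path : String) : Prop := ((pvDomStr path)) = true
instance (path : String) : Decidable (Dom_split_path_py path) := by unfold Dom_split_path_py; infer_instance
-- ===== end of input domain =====

-- B replaces A's character-by-character accumulation loop with one split('/') call that
-- rebuilds the slash-terminated segments (idiomatic decomposition; same O(n) cost).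

-- ===== PORT A =====
-- accumulated Python strings are carried as List Char and converted with String.ofList on return
def split_path_py (path : String) : List String :=
  let st := path.toList.foldl
    (fun (acc : List (List Char) × List Char) c =>
      let part := acc.2 ++ [c]
      if c = '/' then (acc.1 ++ [part], ([] : List Char)) else (acc.1, part))
    ([], [])
  (if st.2 ≠ [] then st.1 ++ [st.2] else st.1).map String.ofList

-- ===== PORT B =====
def split_path_py_alt (path : String) : List String :=
  let parts := PySem.Chars.splitOn path.toList ['/']
  let last := PySem.List.pyGetD parts (-1) []
  ((PySem.List.slice parts none (some (-1))).map (fun p => p ++ ['/'])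
    ++ (if last ≠ [] then [last] else [])).map String.ofList

-- ===== PRECONDITION & SPEC =====
def Spec_split_path_py (path : String) (out : List String) : Prop := out = split_path_py_alt path
instance (path : String) (out : List String) : Decidable (Spec_split_path_py path out) := by unfold Spec_split_path_py; infer_instance

-- ===== CLAIM (what is proved, stated in full; the proofs are below) =====
def Claim_equal_split_path_py : Prop := ∀ (path : String), Dom_split_path_py path → Spec_split_path_py path (split_path_py path)

-- ===== LEMMAS AND PROOFS =====

-- single-char split on '/', structurally (proof-side characterisation of Chars.splitOn)
def sp : List Char → List (List Char)
  | [] => [[]]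
  | c :: cs => if c = '/' then [] :: sp cs else (sp cs).modifyHead (c :: ·)

-- A's loop body and finalisation, as named functions (definitionally the port's lambdas)
def stepA (acc : List (List Char) × List Char) (c : Char) : List (List Char) × List Char :=
  let part := acc.2 ++ [c]
  if c = '/' then (acc.1 ++ [part], []) else (acc.1, part)

def finishA (st : List (List Char) × List Char) : List (List Char) :=
  if st.2 ≠ [] then st.1 ++ [st.2] else st.1

-- B's reconstruction, on the list of pieces
def bshape (l : List (List Char)) : List (List Char) :=
  l.dropLast.map (· ++ ['/']) ++ (if l.getLastD [] ≠ [] then [l.getLastD []] else [])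

theorem sp_ne_nil : ∀ cs : List Char, sp cs ≠ []
  | [] => by simp [sp]
  | c :: cs => by
    simp only [sp]
    split
    · simp
    · cases h : sp cs with
      | nil => exact absurd h (sp_ne_nil cs)
      | cons p ps => simp [List.modifyHead]

theorem go_eq_sp (l : List Char) : ∀ (fuel : Nat) (cur : List Char) (acc : List (List Char)),
    l.length ≤ fuel →
    PySem.Chars.splitOn.go ['/'] fuel l cur acc
      = acc.reverse ++ (sp l).modifyHead (cur.reverse ++ ·) := by
  induction l with
  | nil =>
    intro fuel cur acc _
    cases fuel <;> simp [PySem.Chars.splitOn.go, sp]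
  | cons c rest ih =>
    intro fuel cur acc hfuel
    cases fuel with
    | zero => simp at hfuel
    | succ f =>
      by_cases hc : c = '/'
      · subst hc
        rw [show PySem.Chars.splitOn.go ['/'] (f+1) ('/' :: rest) cur acc
              = PySem.Chars.splitOn.go ['/'] f rest [] (cur.reverse :: acc) by
            simp [PySem.Chars.splitOn.go, List.isPrefixOf]]
        rw [ih f [] (cur.reverse :: acc) (by simpa using Nat.le_of_succ_le_succ hfuel)]
        simp only [sp, if_pos]
        cases h : sp rest <;> simp [List.modifyHead]
      · rw [show PySem.Chars.splitOn.go ['/'] (f+1) (c :: rest) cur acc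
              = PySem.Chars.splitOn.go ['/'] f rest (c :: cur) acc by
            simp [PySem.Chars.splitOn.go, List.isPrefixOf,
              show ¬('/' = c) from fun h => hc h.symm]]
        rw [ih f (c :: cur) acc (by simpa using Nat.le_of_succ_le_succ hfuel)]
        cases h : sp rest with
        | nil => exact absurd h (sp_ne_nil rest)
        | cons p ps => simp [sp, hc, h, List.modifyHead]

theorem splitOn_eq_sp (cs : List Char) : PySem.Chars.splitOn cs ['/'] = sp cs := by
  rw [PySem.Chars.splitOn, go_eq_sp cs (cs.length + 1) [] [] (by omega)]
  cases h : sp cs with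
  | nil => exact absurd h (sp_ne_nil cs)
  | cons p ps => simp [List.modifyHead]

theorem fold_eq_bshape (cs : List Char) : ∀ (parts : List (List Char)) (part : List Char),
    finishA (cs.foldl stepA (parts, part))
      = parts ++ bshape ((sp cs).modifyHead (part ++ ·)) := by
  induction cs with
  | nil =>
    intro parts part
    simp only [List.foldl_nil, finishA, sp, List.modifyHead, bshape]
    by_cases h : part = [] <;> simp [h]
  | cons c rest ih =>
    intro parts part
    rw [List.foldl_cons]
    by_cases hc : c = '/'
    · subst hc
      rw [show stepA (parts, part) '/' = (parts ++ [part ++ ['/']], ([] : List Char)) by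
            simp [stepA]]
      rw [ih (parts ++ [part ++ ['/']]) []]
      cases h : sp rest with
      | nil => exact absurd h (sp_ne_nil rest)
      | cons p ps =>
        simp [sp, bshape, h, List.modifyHead]
    · rw [show stepA (parts, part) c = (parts, part ++ [c]) by simp [stepA, hc]]
      rw [ih parts (part ++ [c])]
      cases h : sp rest with
      | nil => exact absurd h (sp_ne_nil rest)
      | cons p ps => simp [sp, hc, h, List.modifyHead]

theorem alt_eq_bshape (path : String) :
    split_path_py_alt path = (bshape (sp path.toList)).map String.ofList := by
  have hne := sp_ne_nil path.toList
  simp only [split_path_py_alt, splitOn_eq_sp]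
  rw [PySem.List.slice_to_neg_one, PySem.List.pyGetD_neg_one _ _ hne]
  simp only [bshape, List.getLastD_eq_getLast?, List.getLast?_eq_some_getLast hne]
  simp [apply_ite (List.map String.ofList)]

theorem portA_eq (path : String) :
    split_path_py path = (finishA (path.toList.foldl stepA ([], []))).map String.ofList := rfl

-- ===== VERDICT (by name: the statement is the Claim_ definition above) =====
theorem split_path_py_spec : Claim_equal_split_path_py := by
  intro path _
  unfold Spec_split_path_py
  rw [portA_eq, alt_eq_bshape, fold_eq_bshape path.toList [] []]
  cases h : sp path.toList with
  | nil => exact absurd h (sp_ne_nil path.toList)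
  | cons p ps => simp [List.modifyHead]
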